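-- pv_equiv track=rewrite | github.com/PuzickovNikita/PythonTestProj_29.03.2023 | main.py | process_signs
-- ===== SOURCE A (Python) =====
-- def process_signs(signs):
--     current_number = len(signs) - 1
--     res_str = str(current_number)
--     sum = 0
--     current_digit = current_number - 1
--     for sign in signs:
--         if sign == ' ':
--             res_str += str(current_digit)
--             if current_number >= 0:
--                 current_number = current_number*10 + current_digit
--             else:
--                 current_number = current_number*10 - current_digit
--         elif sign == '+':
--             res_str += '+' + str(current_digit)
--             sum += current_number
--             current_number = current_digit
--         elif sign == '-':
--             res_str += '-' + str(current_digit)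
--             sum += current_number
--             current_number = -current_digit
--         elif sign == '.':
--             sum += current_number
--             return res_str, sum
--         current_digit -= 1
--
--     raise TypeError("unexpected signs")
-- ===== SOURCE B (Python) =====
-- def _run_value(run):
--     v = 0
--     for d in run:
--         v = v * 10 + d
--     return v
--
--
-- def _render(run):
--     return ''.join(str(d) for d in run)
--
--
-- def process_signs(signs):
--     if '.' not in signs:
--         raise TypeError("unexpected signs")
--     k = signs.index('.')
--     n = len(signs)
--     # stage 1: split the prefix before '.' into digit runs separated by operators
--     ops = []            # operator in front of each run after the first
--     runs = [[n - 1]]    # each run: the list of digits of one number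
--     for i, sign in enumerate(signs[:k]):
--         d = n - 2 - i
--         if sign == ' ':
--             runs[-1].append(d)
--         elif sign in ('+', '-'):
--             ops.append(sign)
--             runs.append([d])
--     # stage 2: render the expression string from the runs
--     res_str = _render(runs[0]) + ''.join(op + _render(run)
--                                          for op, run in zip(ops, runs[1:]))
--     # stage 3: evaluate the runs
--     total = _run_value(runs[0]) + sum(
--         _run_value(run) if op == '+' else -_run_value(run)
--         for op, run in zip(ops, runs[1:]))
--     return res_str, total
-- ===== Notes on version B (the rewrite author's own statement) =====
-- stated objective: alternative
-- what changed: B is staged: it locates '.' up front (raising TypeError if absent), splits the prefix into an explicit list of digit runs separated by an operator list, and only then renders the expression string by joining the runs and computes the sum by evaluating each run, replacing A's single early-returning loop that interleaves string building with a signed running number and inline sum.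
import Mathlib
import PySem

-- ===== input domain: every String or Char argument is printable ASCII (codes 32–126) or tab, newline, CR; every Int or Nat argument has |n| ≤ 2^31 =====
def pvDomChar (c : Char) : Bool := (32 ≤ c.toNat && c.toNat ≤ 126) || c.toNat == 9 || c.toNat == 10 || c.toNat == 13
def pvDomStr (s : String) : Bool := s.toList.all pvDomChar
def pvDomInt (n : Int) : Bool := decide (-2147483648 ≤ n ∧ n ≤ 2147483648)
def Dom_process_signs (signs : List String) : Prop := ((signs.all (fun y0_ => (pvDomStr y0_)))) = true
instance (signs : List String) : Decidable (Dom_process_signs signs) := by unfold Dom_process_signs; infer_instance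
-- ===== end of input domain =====

-- B replaces A's single early-returning loop (signed running number + inline sum interleaved with
-- string building) by a staged decomposition: locate '.', split the prefix into explicit digit runs
-- separated by an operator list, then render the string and evaluate the runs in separate passes.

-- ===== PORT A =====
-- literal transliteration of A's loop; returns none where the Python raises TypeError
def pvALoop (rest : List String) (cn : Int) (res : String) (sum : Int) (cd : Int) :
    Option (String × Int) :=
  match rest with
  | [] => none
  | sign :: rest =>
    if sign = " " then
      pvALoop rest (if cn ≥ 0 then cn * 10 + cd else cn * 10 - cd)
        (res ++ PySem.Int.toStr cd) sum (cd - 1)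
    else if sign = "+" then
      pvALoop rest cd (res ++ "+" ++ PySem.Int.toStr cd) (sum + cn) (cd - 1)
    else if sign = "-" then
      pvALoop rest (-cd) (res ++ "-" ++ PySem.Int.toStr cd) (sum + cn) (cd - 1)
    else if sign = "." then some (res, sum + cn)
    else pvALoop rest cn res sum (cd - 1)

def process_signs (signs : List String) : String × Int :=
  let current_number : Int := (signs.length : Int) - 1
  (pvALoop signs current_number (PySem.Int.toStr current_number) 0 (current_number - 1)).getD ("", 0)

-- ===== PORT B =====
-- _run_value: v = 0; for d in run: v = v*10 + d
def pvRunValue (run : List Int) : Int := run.foldl (fun v d => v * 10 + d) 0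
-- _render: ''.join(str(d) for d in run)
def pvRender (run : List Int) : String := String.join (run.map PySem.Int.toStr)
-- runs[-1].append(d)
def pvAppendLast : List (List Int) → Int → List (List Int)
  | [], _ => []
  | [r], d => [r ++ [d]]
  | r :: s :: rs, d => r :: pvAppendLast (s :: rs) d

-- one step of Source B's stage-1 loop over enumerate(signs[:k]); state = (ops, runs)
def pvBStep (n : Int) (st : List String × List (List Int)) (p : Int × String) :
    List String × List (List Int) :=
  let (ops, runs) := st
  let (i, sign) := p
  let d := n - 2 - i
  if sign = " " then (ops, pvAppendLast runs d)
  else if sign = "+" ∨ sign = "-" then (ops ++ [sign], runs ++ [[d]])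
  else (ops, runs)

def process_signs_alt (signs : List String) : String × Int :=
  match PySem.List.index? signs "." with
  | none => ("", 0)  -- Source B raises TypeError here ('.' not in signs); outside Pre_
  | some k =>
    let n : Int := (signs.length : Int)
    let st := (PySem.List.enumerate (PySem.List.slice signs none (some (k : Int))) 0).foldl
      (pvBStep n) (([] : List String), [[n - 1]])
    let ops := st.1
    let runs := st.2
    let res_str := pvRender (runs.headD []) ++
      String.join ((ops.zip runs.tail).map (fun p => p.1 ++ pvRender p.2))
    let total := pvRunValue (runs.headD []) +
      ((ops.zip runs.tail).map
        (fun p => if p.1 = "+" then pvRunValue p.2 else -pvRunValue p.2)).foldl (· + ·) 0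
    (res_str, total)

-- ===== PRECONDITION & SPEC =====
-- A raises TypeError exactly when the list contains no '.'; those inputs are excluded.
def Pre_process_signs (signs : List String) : Prop := "." ∈ signs
instance (signs : List String) : Decidable (Pre_process_signs signs) := by
  unfold Pre_process_signs; infer_instance
def pvWitness_process_signs : List String := [" ", "+", "-", "."]

def Spec_process_signs (signs : List String) (out : String × Int) : Prop :=
  out = process_signs_alt signs
instance (signs : List String) (out : String × Int) : Decidable (Spec_process_signs signs out) := by
  unfold Spec_process_signs; infer_instance

-- ===== CLAIM (what is proved, stated in full; the proofs are below) =====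
def Claim_equal_process_signs : Prop :=
  ∀ (signs : List String), Dom_process_signs signs → Pre_process_signs signs →
    Spec_process_signs signs (process_signs signs)

-- ===== LEMMAS AND PROOFS =====

-- the (string, sum) contribution A still produces from the prefix before '.', given the digit
-- counter cd and the current number sgn*mag
def pvTail : List String → Int → Int → Int → String × Int
  | [], _, sgn, mag => ("", sgn * mag)
  | sign :: rest, cd, sgn, mag =>
    if sign = " " then
      (PySem.Int.toStr cd ++ (pvTail rest (cd - 1) sgn (mag * 10 + cd)).1,
       (pvTail rest (cd - 1) sgn (mag * 10 + cd)).2)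
    else if sign = "+" then
      ("+" ++ PySem.Int.toStr cd ++ (pvTail rest (cd - 1) 1 cd).1,
       sgn * mag + (pvTail rest (cd - 1) 1 cd).2)
    else if sign = "-" then
      ("-" ++ PySem.Int.toStr cd ++ (pvTail rest (cd - 1) (-1) cd).1,
       sgn * mag + (pvTail rest (cd - 1) (-1) cd).2)
    else pvTail rest (cd - 1) sgn mag

-- B's stage-1 loop, reformulated: (new ops, extended current run, new runs) added after cur
def pvDelta : List String → Int → List Int → List String × List Int × List (List Int)
  | [], _, cur => ([], cur, [])
  | sign :: rest, cd, cur =>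
    if sign = " " then pvDelta rest (cd - 1) (cur ++ [cd])
    else if sign = "+" ∨ sign = "-" then
      (sign :: (pvDelta rest (cd - 1) [cd]).1, cur,
       (pvDelta rest (cd - 1) [cd]).2.1 :: (pvDelta rest (cd - 1) [cd]).2.2)
    else pvDelta rest (cd - 1) cur

lemma pvAppendLast_append (runs : List (List Int)) (cur : List Int) (d : Int) :
    pvAppendLast (runs ++ [cur]) d = runs ++ [cur ++ [d]] := by
  induction runs with
  | nil => rfl
  | cons r rs ih =>
    cases rs with
    | nil => rfl
    | cons s rs' => simpa [pvAppendLast] using ih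

lemma pvB_fold_delta (n : Int) :
    ∀ (pre : List String) (j : Int) (ops : List String) (runs : List (List Int)) (cur : List Int),
      (PySem.List.enumerate pre j).foldl (pvBStep n) (ops, runs ++ [cur]) =
        (ops ++ (pvDelta pre (n - 2 - j) cur).1,
         runs ++ (pvDelta pre (n - 2 - j) cur).2.1 :: (pvDelta pre (n - 2 - j) cur).2.2) := by
  intro pre
  induction pre with
  | nil => intro j ops runs cur; simp [PySem.List.enumerate_nil, pvDelta]
  | cons s rest ih =>
    intro j ops runs cur
    rw [PySem.List.enumerate_cons]
    by_cases h1 : s = " "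
    · simp only [List.foldl_cons, pvBStep, h1, if_true, pvAppendLast_append]
      rw [ih]
      simp [pvDelta, show n - 2 - (j + 1) = n - 2 - j - 1 from by ring]
    · by_cases h2 : s = "+" ∨ s = "-"
      · simp only [List.foldl_cons, pvBStep, h1, h2, if_true, if_false, List.append_assoc]
        rw [← List.append_assoc, ih]
        simp [pvDelta, h1, h2, show n - 2 - (j + 1) = n - 2 - j - 1 from by ring]
      · simp only [List.foldl_cons, pvBStep, h1, h2, if_false]
        rw [ih]
        simp [pvDelta, h1, h2, show n - 2 - (j + 1) = n - 2 - j - 1 from by ring]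

lemma pvRunValue_append_singleton (l : List Int) (d : Int) :
    pvRunValue (l ++ [d]) = pvRunValue l * 10 + d := by
  simp [pvRunValue, List.foldl_append]

lemma pvRunValue_singleton (d : Int) : pvRunValue [d] = d := by
  simp [pvRunValue]

lemma pvJoin_foldl (l : List String) : ∀ s : String, l.foldl (· ++ ·) s = s ++ String.join l := by
  induction l with
  | nil => intro s; simp [String.join]
  | cons x xs ih =>
    intro s
    simp only [String.join, List.foldl_cons] at ih ⊢
    rw [ih (s ++ x), ih ("" ++ x)]
    simp [String.append_assoc]

lemma pvJoin_append (a b : List String) :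
    String.join (a ++ b) = String.join a ++ String.join b := by
  simp only [String.join, List.foldl_append]
  rw [pvJoin_foldl b (List.foldl (· ++ ·) "" a)]
  simp [String.join]

lemma pvJoin_cons (x : String) (l : List String) :
    String.join (x :: l) = x ++ String.join l := by
  simp only [String.join, List.foldl_cons]
  rw [pvJoin_foldl]
  simp [String.join]

lemma pvRender_append (l l' : List Int) : pvRender (l ++ l') = pvRender l ++ pvRender l' := by
  simp [pvRender, pvJoin_append]

lemma pvRender_singleton (d : Int) : pvRender [d] = PySem.Int.toStr d := by
  simp [pvRender, String.join]

def pvSumL (l : List Int) : Int := l.foldl (· + ·) 0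

lemma pvSumL_cons (x : Int) (l : List Int) : pvSumL (x :: l) = x + pvSumL l := by
  have h : ∀ (m : List Int) (a : Int), m.foldl (· + ·) a = a + m.foldl (· + ·) 0 := by
    intro m
    induction m with
    | nil => intro a; simp
    | cons y m ih => intro a; simp only [List.foldl_cons]; rw [ih (a + y), ih (0 + y)]; ring
  simp only [pvSumL, List.foldl_cons]
  rw [h]
  ring

-- B's stage-2/3 renders of the delta agree with A's remaining contribution pvTail
lemma pvDelta_tail :
    ∀ (pre : List String) (cd sgn : Int) (cur : List Int),
      (pvRender (pvDelta pre cd cur).2.1 ++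
          String.join (((pvDelta pre cd cur).1.zip (pvDelta pre cd cur).2.2).map
            (fun p => p.1 ++ pvRender p.2))
        = pvRender cur ++ (pvTail pre cd sgn (pvRunValue cur)).1)
      ∧ (sgn * pvRunValue (pvDelta pre cd cur).2.1 +
          pvSumL (((pvDelta pre cd cur).1.zip (pvDelta pre cd cur).2.2).map
            (fun p => if p.1 = "+" then pvRunValue p.2 else -pvRunValue p.2))
        = (pvTail pre cd sgn (pvRunValue cur)).2) := by
  intro pre
  induction pre with
  | nil =>
    intro cd sgn cur
    simp [pvDelta, pvTail, pvSumL, String.join]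
  | cons s rest ih =>
    intro cd sgn cur
    by_cases h1 : s = " "
    · have key := ih (cd - 1) sgn (cur ++ [cd])
      simp only [pvDelta, pvTail, h1, if_true] at key ⊢
      rw [pvRunValue_append_singleton] at key
      rw [key.1, key.2, pvRender_append, pvRender_singleton]
      simp [String.append_assoc]
    · by_cases h2 : s = "+"
      · subst h2
        obtain ⟨k1, k2⟩ := ih (cd - 1) 1 [cd]
        rw [pvRunValue_singleton] at k1 k2
        simp only [pvDelta, pvTail, if_neg h1, true_or, if_true, 
          List.zip_cons_cons, List.map_cons, pvJoin_cons, pvSumL_cons, pvRender_singleton,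
          one_mul] at k1 k2 ⊢
        constructor
        · simp only [String.append_assoc] at k1 ⊢
          rw [k1]
        · rw [k2]
      · by_cases h3 : s = "-"
        · subst h3
          obtain ⟨k1, k2⟩ := ih (cd - 1) (-1) [cd]
          rw [pvRunValue_singleton] at k1 k2
          simp only [pvDelta, pvTail, if_neg h1, or_true,
            if_neg (by decide : ("-" : String) = "+" → False), if_true, 
            List.zip_cons_cons, List.map_cons, pvJoin_cons, pvSumL_cons, pvRender_singleton,
            neg_one_mul] at k1 k2 ⊢
          constructor
          · simp only [String.append_assoc] at k1 ⊢
            rw [k1]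
          · rw [k2]
        · have key := ih (cd - 1) sgn cur
          have hor : ¬ (s = "+" ∨ s = "-") := by tauto
          simp only [pvDelta, pvTail, h1, h2, h3, 
            ] at key ⊢
          exact key

-- the main invariant for A's loop: it returns res ++ pvTail.1 and s + pvTail.2
lemma pvA_tail :
    ∀ (pre suf : List String) (sgn mag cd s : Int) (res : String),
      "." ∉ pre → (sgn = 1 ∨ sgn = -1) → mag ≥ cd → cd ≥ (pre.length : Int) - 1 →
      pvALoop (pre ++ "." :: suf) (sgn * mag) res s cd =
        some (res ++ (pvTail pre cd sgn mag).1, s + (pvTail pre cd sgn mag).2) := by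
  intro pre
  induction pre with
  | nil =>
    intro suf sgn mag cd s res _ _ _ _
    simp [pvALoop, pvTail]
  | cons sign rest ih =>
    intro suf sgn mag cd s res hdot hsgn hmag hcd
    have hdot' : "." ∉ rest := fun h => hdot (List.mem_cons_of_mem _ h)
    have hne : sign ≠ "." := fun h => hdot (h ▸ List.mem_cons_self)
    have hlen : cd ≥ (rest.length : Int) := by
      simp [List.length_cons] at hcd; omega
    by_cases h1 : sign = " "
    · subst h1
      have hcd0 : cd ≥ 0 := by
        have : (rest.length : Int) ≥ 0 := by positivity
        omega
      have hcn : (if sgn * mag ≥ 0 then sgn * mag * 10 + cd else sgn * mag * 10 - cd)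
          = sgn * (mag * 10 + cd) := by
        rcases hsgn with h | h <;> subst h <;>
          simp only [one_mul, neg_mul] <;> split_ifs <;> omega
      have key := ih suf sgn (mag * 10 + cd) (cd - 1) s (res ++ PySem.Int.toStr cd) hdot'
        hsgn (by nlinarith) (by omega)
      simp only [List.cons_append, pvALoop, if_true, hcn, key, pvTail]
      simp [String.append_assoc]
    · by_cases h2 : sign = "+"
      · subst h2
        have key := ih suf 1 cd (cd - 1) (s + sgn * mag) (res ++ "+" ++ PySem.Int.toStr cd)
          hdot' (Or.inl rfl) (by omega) (by omega)
        simp only [one_mul] at key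
        simp only [List.cons_append, pvALoop, if_neg (by decide : ("+" : String) ≠ " "),
          if_true, key, pvTail, Option.some.injEq, Prod.mk.injEq]
        constructor
        · simp [String.append_assoc]
        · ring
      · by_cases h3 : sign = "-"
        · subst h3
          have key := ih suf (-1) cd (cd - 1) (s + sgn * mag) (res ++ "-" ++ PySem.Int.toStr cd)
            hdot' (Or.inr rfl) (by omega) (by omega)
          simp only [neg_one_mul] at key
          simp only [List.cons_append, pvALoop, if_neg (by decide : ("-" : String) ≠ " "),
            if_neg (by decide : ("-" : String) ≠ "+"), if_true, key, pvTail,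
            Option.some.injEq, Prod.mk.injEq]
          constructor
          · simp [String.append_assoc]
          · ring
        · have key := ih suf sgn mag (cd - 1) s res hdot' hsgn (by omega) (by omega)
          simp only [List.cons_append, pvALoop, h1, h2, h3, hne, 
            if_false, key, pvTail]

-- ===== VERDICT (by name: the statement is the Claim_ definition above) =====
theorem process_signs_spec : Claim_equal_process_signs := by
  intro signs _ hpre
  unfold Spec_process_signs process_signs process_signs_alt
  rcases Option.isSome_iff_exists.mp ((PySem.List.index?_isSome_iff signs ".").mpr hpre) with ⟨k, hk⟩
  obtain ⟨pre, suf, hdec, hlenk, hnotin⟩ := (PySem.List.index?_eq_some_iff signs "." k).mp hk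
  have hslice : PySem.List.slice signs none (some (k : Int)) = pre := by
    rw [PySem.List.slice_to_natCast, hdec, ← hlenk, List.take_left]
  have hn : ((signs.length : Int)) = (pre.length : Int) + 1 + (suf.length : Int) := by
    rw [hdec]; push_cast [List.length_append, List.length_cons]; ring
  have hsuf : (0 : Int) ≤ (suf.length : Int) := by positivity
  -- A's side: the loop returns res0 ++ pvTail.1 and 0 + pvTail.2
  have hA := pvA_tail pre suf 1 ((signs.length : Int) - 1) ((signs.length : Int) - 2) 0
    (PySem.Int.toStr ((signs.length : Int) - 1)) hnotin (Or.inl rfl) (by omega)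
    (by omega)
  rw [one_mul, ← hdec] at hA
  -- B's side: the fold produces the delta of pre
  have hB := pvB_fold_delta (signs.length : Int) pre 0 [] [] [((signs.length : Int) - 1)]
  simp only [List.nil_append, sub_zero] at hB
  have hD := pvDelta_tail pre ((signs.length : Int) - 2) 1 [((signs.length : Int) - 1)]
  rw [pvRunValue_singleton, pvRender_singleton] at hD
  simp only [hk, hslice, hB, List.headD_cons, List.tail_cons]
  rw [show ((signs.length : Int) - 1 - 1) = ((signs.length : Int) - 2) from by ring, hA]
  simp only [Option.getD_some, one_mul] at hD ⊢
  refine Prod.ext hD.1.symm ?_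
  have h2 := hD.2
  simp only [pvSumL] at h2
  rw [← h2]
  ring
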